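-- pv_equiv track=rewrite | github.com/joeshiller/Final-Project-MSML-605 | scripts/make_pairs.py | group_by_identity
-- ===== SOURCE A (Python) =====
-- from collections import defaultdict
--
-- def group_by_identity(rows):
--     grouped = defaultdict(list)
--
--     for row in rows:
--         grouped[row["identity"]].append(row["image_path"])
--
--     identity_to_images = {}
--     for identity in sorted(grouped.keys()):
--         identity_to_images[identity] = sorted(grouped[identity])
--
--     return identity_to_images
-- ===== SOURCE B (Python) =====
-- def group_by_identity(rows):
--     # no intermediate dict: sorted distinct identities, then one comprehension per identity
--     ids = sorted({row["identity"] for row in rows})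
--     return {i: sorted(row["image_path"] for row in rows if row["identity"] == i)
--             for i in ids}
-- ===== Notes on version B (the rewrite author's own statement) =====
-- stated objective: simpler
-- what changed: B drops the defaultdict accumulation entirely: it sorts the distinct identities once and builds each image list by a direct comprehension filtering the rows per identity, instead of A's one-pass dict grouping followed by key-sorting and per-key list sorting.
import Mathlib
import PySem

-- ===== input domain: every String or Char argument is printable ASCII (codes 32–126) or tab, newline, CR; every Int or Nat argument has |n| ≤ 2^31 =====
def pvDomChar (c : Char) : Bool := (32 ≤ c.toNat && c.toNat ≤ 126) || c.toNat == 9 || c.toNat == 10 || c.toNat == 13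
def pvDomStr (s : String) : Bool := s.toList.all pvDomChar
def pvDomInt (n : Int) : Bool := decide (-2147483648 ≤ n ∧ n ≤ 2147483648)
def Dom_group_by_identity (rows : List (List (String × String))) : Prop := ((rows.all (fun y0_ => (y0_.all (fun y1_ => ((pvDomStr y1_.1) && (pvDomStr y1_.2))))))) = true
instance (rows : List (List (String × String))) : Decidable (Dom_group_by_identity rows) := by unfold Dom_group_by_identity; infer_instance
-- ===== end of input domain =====

-- B replaces A's defaultdict-group-then-sort with sorted-distinct-identities plus a per-identity
-- filtering comprehension (simpler decomposition, no intermediate dict; not claimed faster).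


-- row["k"]: first-match lookup in the row's association list; total form used under
-- Pre_ (which demands both keys are present, exactly where Python's row["k"] would not raise)
def rowGet (row : List (String × String)) (k : String) : String :=
  (PySem.Dict.mk row).getD k ""

-- ===== PORT A =====
def group_by_identity (rows : List (List (String × String))) : List (String × List String) :=
  let grouped : PySem.Dict String (List String) :=
    rows.foldl (fun d row => d.modify (rowGet row "identity") [] (fun l => l ++ [rowGet row "image_path"])) PySem.Dict.empty
  let identity_to_images : PySem.Dict String (List String) :=
    (PySem.List.sorted grouped.keys (fun x => x) false).foldl
      (fun d identity => d.insert identity (PySem.List.sorted (grouped.getD identity []) (fun x => x) false))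
      PySem.Dict.empty
  identity_to_images.items

-- ===== PORT B =====
def group_by_identity_alt (rows : List (List (String × String))) : List (String × List String) :=
  let ids : List String :=
    PySem.List.sorted (PySem.Set.ofList (rows.map (fun row => rowGet row "identity"))) (fun x => x) false
  ids.map (fun i =>
    (i, PySem.List.sorted ((rows.filter (fun row => rowGet row "identity" == i)).map (fun row => rowGet row "image_path")) (fun x => x) false))

-- ===== PRECONDITION & SPEC =====
-- Pre_: every row has both the "identity" and the "image_path" key (otherwise A raises KeyError)
def Pre_group_by_identity (rows : List (List (String × String))) : Prop :=
  ∀ row ∈ rows, (PySem.Dict.mk row).contains "identity" = true ∧ (PySem.Dict.mk row).contains "image_path" = true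
instance (rows : List (List (String × String))) : Decidable (Pre_group_by_identity rows) := by unfold Pre_group_by_identity; infer_instance
def pvWitness_group_by_identity : (List (List (String × String))) :=
  [[("identity", "b"), ("image_path", "p2")], [("identity", "a"), ("image_path", "p9")], [("identity", "b"), ("image_path", "p1")]]

def Spec_group_by_identity (rows : List (List (String × String))) (out : List (String × List String)) : Prop := out = group_by_identity_alt rows
instance (rows : List (List (String × String))) (out : List (String × List String)) : Decidable (Spec_group_by_identity rows out) := by unfold Spec_group_by_identity; infer_instance

-- ===== CLAIM (what is proved, stated in full; the proofs are below) =====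
def Claim_equal_group_by_identity : Prop := ∀ (rows : List (List (String × String))), Dom_group_by_identity rows → Pre_group_by_identity rows → Spec_group_by_identity rows (group_by_identity rows)

-- ===== LEMMAS AND PROOFS =====

-- A's grouping fold, re-expressed as a fold over (identity, path) pairs
theorem grouped_eq_pairs (rows : List (List (String × String))) :
    rows.foldl (fun (d : PySem.Dict String (List String)) row => d.modify (rowGet row "identity") [] (fun l => l ++ [rowGet row "image_path"])) PySem.Dict.empty
    = (rows.map (fun row => (rowGet row "identity", rowGet row "image_path"))).foldl
        (fun d p => d.modify p.1 [] (fun l => l ++ [p.2])) PySem.Dict.empty := by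
  rw [List.foldl_map]

theorem group_by_identity_spec0 (rows : List (List (String × String))) :
    group_by_identity rows = group_by_identity_alt rows := by
  unfold group_by_identity group_by_identity_alt
  set grouped := rows.foldl (fun (d : PySem.Dict String (List String)) row => d.modify (rowGet row "identity") [] (fun l => l ++ [rowGet row "image_path"])) PySem.Dict.empty with hg
  have hkeys : grouped.keys = PySem.Set.ofList (rows.map (fun row => rowGet row "identity")) := by
    rw [hg, grouped_eq_pairs, PySem.Dict.keys_foldl_modify_key]
    simp [PySem.Set.update, PySem.Set.ofList_eq_foldl, List.map_map, Function.comp_def]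
  have hget : ∀ k, grouped.getD k []
      = (rows.filter (fun row => rowGet row "identity" == k)).map (fun row => rowGet row "image_path") := by
    intro k
    rw [hg, grouped_eq_pairs, PySem.Dict.getD_foldl_modify_append]
    simp [List.filter_map, List.map_map, Function.comp_def]
  set ids := PySem.List.sorted (PySem.Set.ofList (rows.map (fun row => rowGet row "identity"))) (fun x => x) false with hids
  have hnodup : ids.Nodup := by
    have := PySem.List.sorted_perm (PySem.Set.ofList (rows.map (fun row => rowGet row "identity"))) (fun x : String => x) false
    exact this.nodup_iff.mpr (PySem.Set.nodup_ofList _)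
  simp only [hkeys, ← hids]
  rw [PySem.Dict.items_foldl_insert_fresh _ _ _ _ (by simp [PySem.Dict.contains_empty]) (by simpa using hnodup)]
  simp only [PySem.Dict.empty, List.nil_append]
  exact List.map_congr_left (fun k _ => by rw [hget k])

-- ===== VERDICT (by name: the statement is the Claim_ definition above) =====
theorem group_by_identity_spec : Claim_equal_group_by_identity := by
  intro rows _ _
  unfold Spec_group_by_identity
  exact group_by_identity_spec0 rows
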